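-- pv_equiv track=rewrite | github.com/K-Terelak/algorithms-and-data-structures-2 | lab_2/6_smallest_last/smallest_last.py | sl_coloring
-- ===== SOURCE A (Python) =====
-- import heapq
-- from collections import defaultdict
--
-- def sl_coloring(edges, n):
--     graph = defaultdict(list)
--     for u, v in edges:
--         graph[u].append(v)
--         graph[v].append(u)
--
--     degree = {node: len(adj) for node, adj in graph.items()}
--
--     heap = [(len(adj), node) for node, adj in graph.items()]
--     heapq.heapify(heap)
--
--     elimination_order = []
--     while heap:
--         _, node = heapq.heappop(heap)
--         elimination_order.append(node)
--         for neighbor in graph[node]: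
--             if neighbor in degree:
--                 degree[neighbor] -= 1
--                 heap = [(degree[n], n) for n in degree if n != node]
--                 heapq.heapify(heap)
--         del degree[node]
--
--     color = {}
--     for node in reversed(elimination_order):
--         available_colors = {color[neighbor] for neighbor in graph[node] if neighbor in color}
--         for c in range(n):
--             if c not in available_colors:
--                 color[node] = c
--                 break
--
--     return color
--
-- edges = [('A', 'B'), ('B', 'C'), ('C', 'A'), ('A', 'D')]
--
-- n = 4
-- ===== SOURCE B (Python) =====
-- def sl_coloring(edges, n):
--     # Smallest-last greedy colouring without a heap and without adjacency lists:
--     # keep the list of remaining nodes, recompute all degrees by one edge scan per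
--     # round, pick the min-(degree, name) node, and colour by scanning the edge
--     # list directly with a mex while-loop.
--     nodes = []
--     for u, v in edges:
--         if u not in nodes:
--             nodes.append(u)
--         if v not in nodes:
--             nodes.append(v)
--
--     order = []
--     while nodes:
--         deg = {x: 0 for x in nodes}
--         for u, v in edges:
--             if u in deg and v in deg:
--                 deg[u] += 1
--                 deg[v] += 1
--         node = min(nodes, key=lambda x: (deg[x], x))
--         order.append(node)
--         nodes = [x for x in nodes if x != node]
--
--     color = {}
--     for node in reversed(order):
--         used = set()
--         for u, v in edges:
--             if u == node and v in color:
--                 used.add(color[v])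
--             if v == node and u in color:
--                 used.add(color[u])
--         c = 0
--         while c in used:
--             c += 1
--         if c < n:
--             color[node] = c
--     return color
-- ===== Notes on version B (the rewrite author's own statement) =====
-- stated objective: alternative
-- what changed: B keeps no adjacency lists, no incrementally-maintained degree dict and no heap: it holds only the list of remaining nodes, recomputes all degrees from the raw edge list in one scan per round and takes min(nodes, key=(deg, name)), and colours a node by scanning the edge list directly with a mex while-loop instead of range(n) over adjacency lists.
import Mathlib
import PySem

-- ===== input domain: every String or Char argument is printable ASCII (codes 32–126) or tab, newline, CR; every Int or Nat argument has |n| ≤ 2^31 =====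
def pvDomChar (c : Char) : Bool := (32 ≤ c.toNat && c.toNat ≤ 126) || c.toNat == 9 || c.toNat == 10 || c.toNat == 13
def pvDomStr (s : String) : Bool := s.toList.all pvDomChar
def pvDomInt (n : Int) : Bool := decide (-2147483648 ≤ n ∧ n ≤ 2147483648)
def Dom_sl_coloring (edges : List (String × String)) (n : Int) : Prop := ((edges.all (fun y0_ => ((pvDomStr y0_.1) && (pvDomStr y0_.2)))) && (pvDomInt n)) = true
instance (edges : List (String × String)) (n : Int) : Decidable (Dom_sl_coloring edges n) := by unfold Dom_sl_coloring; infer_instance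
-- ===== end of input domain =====

-- B keeps no adjacency lists, no maintained degree dict and no heap: it recomputes
-- all degrees from the raw edge list once per elimination round and colours by
-- scanning the edge list with a mex loop (objective: alternative).

-- ===== PORT A =====
-- graph = defaultdict(list); graph[u].append(v) is exactly d[u] = d.get(u, []) + [v]
def slGraphA (edges : List (String × String)) : PySem.Dict String (List String) :=
  edges.foldl
    (fun g p => (g.modify p.1 [] (fun l => l ++ [p.2])).modify p.2 [] (fun l => l ++ [p.1]))
    PySem.Dict.empty

-- degree = {node: len(adj) for node, adj in graph.items()}  (graph keys are distinct)
def slDegreeA (g : PySem.Dict String (List String)) : PySem.Dict String Int :=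
  g.items.foldl (fun d p => d.insert p.1 (p.2.length : Int)) PySem.Dict.empty

-- the while-heap loop; heapq is modelled by its observable behaviour: heappop removes
-- the lexicographically least (degree, node) pair — exact here because the heap entries
-- are always pairwise distinct pairs.  fuel = number of heap entries; exactly one node
-- is eliminated per iteration (established by the invariant proved below).
def slLoopA (graph : PySem.Dict String (List String)) :
    Nat → List (Int × String) → PySem.Dict String Int → List String → List String
  | 0, _, _, acc => acc
  | fuel+1, heap, degree, acc =>
    match PySem.List.min2? heap (fun p => p.1) (fun p => p.2) with
    | none => acc
    | some m =>
      let node := m.2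
      let st := (graph.getD node []).foldl
        (fun st nb =>
          if st.1.contains nb then
            let d' := st.1.insert nb (st.1.getD nb 0 - 1)
            -- heap = [(degree[n], n) for n in degree if n != node] (+ heapify)
            (d', (d'.keys.filter (fun k => !(k == node))).map (fun k => (d'.getD k 0, k)))
          else st)
        (degree, heap.erase m)
      -- del degree[node]  (node is always still a key here, so erase is exact)
      slLoopA graph fuel st.2 (st.1.erase node) (acc ++ [node])

-- for c in range(n): if c not in available_colors: … break — the range is iterated
-- lazily with early exit, so it is ported as a bounded count-up recursion
-- (fuel = len(range(a, n)), c counts a, a+1, …; none = the loop fell through)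
def slFindColorA (avail : PySem.Set Int) : Nat → Int → Option Int
  | 0, _ => none
  | fuel+1, c => if !(PySem.Set.contains avail c) then some c else slFindColorA avail fuel (c + 1)

-- available_colors = {color[nb] for nb in graph[node] if nb in color}; then the first
-- c in range(n) not in it is assigned (loop falls through => node stays uncoloured)
def slColorA (graph : PySem.Dict String (List String)) (n : Int) :
    List String → PySem.Dict String Int → PySem.Dict String Int
  | [], color => color
  | node :: rest, color =>
    let avail : PySem.Set Int := (graph.getD node []).foldl
      (fun s nb => if color.contains nb then PySem.Set.add s (color.getD nb 0) else s)
      PySem.Set.empty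
    match slFindColorA avail n.toNat 0 with
    | some c => slColorA graph n rest (color.insert node c)
    | none => slColorA graph n rest color

def sl_coloring (edges : List (String × String)) (n : Int) : List (String × Int) :=
  let graph := slGraphA edges
  let degree := slDegreeA graph
  let heap := graph.items.map (fun p => ((p.2.length : Int), p.1))
  let order := slLoopA graph heap.length heap degree []
  (slColorA graph n order.reverse PySem.Dict.empty).items

-- ===== PORT B =====
-- nodes = []; for u, v in edges: append u, v if unseen  (a first-occurrence list)
def slNodesB (edges : List (String × String)) : List String :=
  edges.foldl (fun s e => PySem.Set.add (PySem.Set.add s e.1) e.2) PySem.Set.empty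

-- deg = {x: 0 for x in nodes}; for u, v in edges: if u in deg and v in deg: deg[u]+=1; deg[v]+=1
def slDegDictB (edges : List (String × String)) (rem : List String) : PySem.Dict String Int :=
  edges.foldl
    (fun d e =>
      if d.contains e.1 && d.contains e.2 then
        (d.modify e.1 0 (· + 1)).modify e.2 0 (· + 1)
      else d)
    (rem.foldl (fun d x => d.insert x 0) PySem.Dict.empty)

-- while nodes: rebuild deg, take min(nodes, key=(deg[x], x)), drop that node.
-- fuel = len(nodes): exactly one node is removed per iteration, so the fuel is exact.
def slLoopB (edges : List (String × String)) :
    Nat → List String → List String → List String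
  | 0, _, acc => acc
  | fuel+1, rem, acc =>
    let deg := slDegDictB edges rem
    match PySem.List.min2? rem (fun x => deg.getD x 0) (fun x => x) with
    | none => acc
    | some node => slLoopB edges fuel (rem.filter (fun x => !(x == node))) (acc ++ [node])

-- used = set(); for u, v in edges: the two symmetric membership tests
def slUsedB (edges : List (String × String)) (color : PySem.Dict String Int)
    (node : String) : PySem.Set Int :=
  edges.foldl
    (fun s e =>
      let s' := if e.1 == node && color.contains e.2 then PySem.Set.add s (color.getD e.2 0) else s
      if e.2 == node && color.contains e.1 then PySem.Set.add s' (color.getD e.1 0) else s')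
    PySem.Set.empty

-- c = 0; while c in used: c += 1 — fuel len(used)+1 is exact: the loop makes at most
-- len(used) successful membership tests (the mex of a set of size s is ≤ s)
def slMexB (used : PySem.Set Int) : Nat → Int → Int
  | 0, c => c
  | fuel+1, c => if PySem.Set.contains used c then slMexB used fuel (c + 1) else c

def slColorB (edges : List (String × String)) (n : Int) :
    List String → PySem.Dict String Int → PySem.Dict String Int
  | [], color => color
  | node :: rest, color =>
    let used := slUsedB edges color node
    let c := slMexB used (used.length + 1) 0
    slColorB edges n rest (if c < n then color.insert node c else color)

def sl_coloring_alt (edges : List (String × String)) (n : Int) : List (String × Int) :=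
  let nodes := slNodesB edges
  let order := slLoopB edges nodes.length nodes []
  (slColorB edges n order.reverse PySem.Dict.empty).items

-- ===== PRECONDITION & SPEC =====
def Spec_sl_coloring (edges : List (String × String)) (n : Int) (out : List (String × Int)) : Prop := out = sl_coloring_alt edges n
instance (edges : List (String × String)) (n : Int) (out : List (String × Int)) : Decidable (Spec_sl_coloring edges n out) := by unfold Spec_sl_coloring; infer_instance

-- ===== CLAIM (what is proved, stated in full; the proofs are below) =====
def Claim_equal_sl_coloring : Prop := ∀ (edges : List (String × String)) (n : Int), Dom_sl_coloring edges n → Spec_sl_coloring edges n (sl_coloring edges n)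

-- ===== LEMMAS AND PROOFS =====

-- M, a proof-only middle layer: A's elimination loop with the heap replaced by its
-- observable content (the current degree dict), and A's colour loop with range(n)
-- replaced by the truncated mex.  A = M is proved first, then M = B.
def slLoopM (adj : PySem.Dict String (List String)) :
    Nat → PySem.Dict String Int → List String → List String
  | 0, _, acc => acc
  | fuel+1, degree, acc =>
    match PySem.List.min2? degree.keys (fun x => degree.getD x 0) (fun x => x) with
    | none => acc
    | some node =>
      let deg2 := (adj.getD node []).foldl
        (fun d nb => if d.contains nb then d.insert nb (d.getD nb 0 - 1) else d)
        degree
      slLoopM adj fuel (deg2.erase node) (acc ++ [node])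

def slColorM (adj : PySem.Dict String (List String)) (n : Int) :
    List String → PySem.Dict String Int → PySem.Dict String Int
  | [], color => color
  | node :: rest, color =>
    let used : PySem.Set Int := (adj.getD node []).foldl
      (fun s nb => if color.contains nb then PySem.Set.add s (color.getD nb 0) else s)
      PySem.Set.empty
    let c := slMexB used (used.length + 1) 0
    slColorM adj n rest (if c < n then color.insert node c else color)

-- the undirected edge list seen as directed pairs, both ways (proof-only view)
def slPairs (edges : List (String × String)) : List (String × String) :=
  edges.flatMap (fun e => [(e.1, e.2), (e.2, e.1)])

-- the mathematical degree of x among the remaining nodes rem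
def slDeg (edges : List (String × String)) (rem : List String) (x : String) : Int :=
  ((slPairs edges).countP (fun p => p.1 == x && rem.contains p.2) : Int)

-- ---- part 1: A = M (the heap is always exactly the current degree dict) ----

-- the graph/adjacency dict always has distinct keys
theorem sl_graph_pairs (edges : List (String × String)) (g : PySem.Dict String (List String)) :
    edges.foldl
      (fun g p => (g.modify p.1 [] (fun l => l ++ [p.2])).modify p.2 [] (fun l => l ++ [p.1])) g
    = (slPairs edges).foldl (fun g p => g.modify p.1 [] (fun l => l ++ [p.2])) g := by
  induction edges generalizing g with
  | nil => rfl
  | cons e es ih => simp [slPairs, List.flatMap_cons, ih]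

theorem sl_graph_nodup (edges : List (String × String)) : (slGraphA edges).keys.Nodup := by
  unfold slGraphA
  rw [sl_graph_pairs]
  exact PySem.Dict.nodup_keys_foldl_modify_key (slPairs edges) (fun p => p.1) []
    (fun _ p => fun l => l ++ [p.2]) PySem.Dict.empty
    (by rw [PySem.Dict.keys_empty]; exact List.nodup_nil)

-- the degree-dict comprehension over a nodup-keyed items list is just a map
theorem sl_degree_items (l : List (String × List String)) (d : PySem.Dict String Int)
    (h : (d.keys ++ l.map (fun p => p.1)).Nodup) :
    (l.foldl (fun d p => d.insert p.1 (p.2.length : Int)) d).items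
      = d.items ++ l.map (fun p => (p.1, (p.2.length : Int))) := by
  induction l generalizing d with
  | nil => simp
  | cons p l ih =>
    have hmem : p.1 ∉ d.keys := by
      rw [List.nodup_append] at h
      exact fun hk => h.2.2 p.1 hk p.1 (by simp) rfl
    have hc : d.contains p.1 = false := by
      rw [PySem.Dict.contains_eq_decide_mem_keys]
      simpa using hmem
    have hitems := PySem.Dict.items_insert_of_not_contains d ((p.2.length : Int)) hc
    have hkeys : (d.insert p.1 ((p.2.length : Int))).keys = d.keys ++ [p.1] :=
      PySem.Dict.keys_insert_of_not_contains d _ hc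
    rw [List.foldl_cons, ih _ (by
      rw [hkeys]
      rw [List.nodup_append] at h ⊢
      refine ⟨?_, by have h21 := h.2.1; rw [List.map_cons, List.nodup_cons] at h21; exact h21.2, ?_⟩
      · rw [List.nodup_append]
        refine ⟨h.1, List.nodup_singleton _, ?_⟩
        intro a ha b hb
        simp only [List.mem_singleton] at hb
        subst hb
        intro hab
        exact hmem (hab ▸ ha)
      · intro a ha b hb
        rw [List.mem_append] at ha
        rcases ha with ha | ha
        · exact h.2.2 a ha b (List.mem_cons_of_mem _ hb)
        · simp only [List.mem_singleton] at ha
          subst ha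
          have hp1 : p.1 ∉ l.map (fun p => p.1) := by
            have h21 := h.2.1
            rw [List.map_cons, List.nodup_cons] at h21
            exact h21.1
          intro hab
          exact hp1 (hab ▸ hb)), hitems]
    simp

-- items viewed through keys (nodup): the swapped items list is the keys-comprehension
theorem sl_items_swap_eq_keys_map (d : PySem.Dict String Int) (h : d.keys.Nodup) :
    d.items.map (fun p => (p.2, p.1)) = d.keys.map (fun k => (d.getD k 0, k)) := by
  show d.items.map (fun p => (p.2, p.1)) = (d.items.map (fun x => x.1)).map (fun k => (d.getD k 0, k))
  rw [List.map_map]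
  apply List.map_congr_left
  intro p hp
  have : d.getD p.1 0 = p.2 := PySem.Dict.getD_of_mem_items d (by exact hp) h 0
  simp [this]

-- the rebuild comprehension equals the swapped items of (erase node)
theorem sl_rebuild_eq_erase (d : PySem.Dict String Int) (node : String) (h : d.keys.Nodup) :
    (d.keys.filter (fun k => !(k == node))).map (fun k => (d.getD k 0, k))
      = (d.erase node).items.map (fun p => (p.2, p.1)) := by
  show ((d.items.map (fun x => x.1)).filter (fun k => !(k == node))).map (fun k => (d.getD k 0, k))
      = (d.items.filter (fun p => !(p.1 == node))).map (fun p => (p.2, p.1))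
  rw [List.filter_map, List.map_map]
  apply List.map_congr_left
  intro p hp
  have hp' : p ∈ d.items := List.mem_of_mem_filter hp
  have : d.getD p.1 0 = p.2 := PySem.Dict.getD_of_mem_items d (by exact hp') h 0
  simp [Function.comp_apply, this]

-- min2? commutes with map
theorem sl_min2_map {α β : Type} (f : α → β) (xs : List α)
    (k1 : β → Int) (k2 : β → String) :
    PySem.List.min2? (xs.map f) k1 k2
      = Option.map f (PySem.List.min2? xs (fun x => k1 (f x)) (fun x => k2 (f x))) := by
  unfold PySem.List.min2?
  have aux : ∀ (ys : List α) (acc : Option α),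
      List.foldl
        (fun acc x =>
          match acc with
          | none => some x
          | some m => if (decide (k1 x < k1 m) || (!decide (k1 m < k1 x) && decide (k2 x < k2 m))) then some x else some m)
        (Option.map f acc) (ys.map f)
      = Option.map f (List.foldl
          (fun acc x =>
            match acc with
            | none => some x
            | some m => if (decide (k1 (f x) < k1 (f m)) || (!decide (k1 (f m) < k1 (f x)) && decide (k2 (f x) < k2 (f m)))) then some x else some m)
          acc ys) := by
    intro ys
    induction ys with
    | nil => intro acc; simp
    | cons y ys ih =>
      intro acc
      rw [List.map_cons, List.foldl_cons, List.foldl_cons]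
      cases acc with
      | none => simpa using ih (some y)
      | some m =>
        simp only [Option.map_some]
        by_cases hcond : (decide (k1 (f y) < k1 (f m)) || (!decide (k1 (f m) < k1 (f y)) && decide (k2 (f y) < k2 (f m)))) = true
        · simp only [hcond, if_true]
          simpa using ih (some y)
        · simp only [Bool.not_eq_true] at hcond
          simp only [hcond]
          simpa using ih (some m)
  exact aux xs none

theorem sl_min2_mem {α : Type} (xs : List α) (k1 : α → Int) (k2 : α → String) {m : α}
    (h : PySem.List.min2? xs k1 k2 = some m) : m ∈ xs := by
  unfold PySem.List.min2? at h
  have aux : ∀ (ys : List α) (acc : Option α) (m : α),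
      List.foldl
        (fun acc x =>
          match acc with
          | none => some x
          | some m => if (decide (k1 x < k1 m) || (!decide (k1 m < k1 x) && decide (k2 x < k2 m))) then some x else some m)
        acc ys = some m → m ∈ ys ∨ acc = some m := by
    intro ys
    induction ys with
    | nil => intro acc m hm; exact Or.inr hm
    | cons y ys ih =>
      intro acc m hm
      rw [List.foldl_cons] at hm
      cases acc with
      | none =>
        rcases ih (some y) m hm with hy | hy
        · exact Or.inl (List.mem_cons_of_mem _ hy)
        · simp only [Option.some.injEq] at hy
          exact Or.inl (hy ▸ List.mem_cons_self)
      | some a =>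
        by_cases hcond : (decide (k1 y < k1 a) || (!decide (k1 a < k1 y) && decide (k2 y < k2 a))) = true
        · simp only [hcond, if_true] at hm
          rcases ih (some y) m hm with hy | hy
          · exact Or.inl (List.mem_cons_of_mem _ hy)
          · simp only [Option.some.injEq] at hy
            exact Or.inl (hy ▸ List.mem_cons_self)
        · simp only [Bool.not_eq_true] at hcond
          simp only [hcond] at hm
          rcases ih (some a) m hm with hy | hy
          · exact Or.inl (List.mem_cons_of_mem _ hy)
          · exact Or.inr hy
  rcases aux xs none m h with hm | hm
  · exact hm
  · simp at hm

-- erasing the popped pair from the swapped items = erasing its key from the dict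
theorem sl_erase_pair (l : List (String × Int)) (k0 : String) (v0 : Int)
    (h : (l.map (fun p => p.1)).Nodup) (hm : (k0, v0) ∈ l) :
    (l.map (fun p => (p.2, p.1))).erase (v0, k0)
      = (l.filter (fun p => !(p.1 == k0))).map (fun p => (p.2, p.1)) := by
  induction l with
  | nil => simp at hm
  | cons p l ih =>
    rw [List.map_cons, List.nodup_cons] at h
    rcases List.mem_cons.mp hm with hp | hp
    · subst hp
      rw [List.map_cons, List.erase_cons_head, List.filter_cons]
      simp only [beq_self_eq_true, Bool.not_true, Bool.false_eq_true, if_false]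
      have : l.filter (fun p => !(p.1 == k0)) = l := by
        rw [List.filter_eq_self]
        intro q hq
        have hq1 : q.1 ∈ l.map (fun p => p.1) := List.mem_map.mpr ⟨q, hq, rfl⟩
        have : q.1 ≠ k0 := fun he => h.1 (he ▸ hq1)
        simpa using this
      rw [this]
    · have hk0 : k0 ∈ l.map (fun p => p.1) := List.mem_map.mpr ⟨(k0, v0), hp, rfl⟩
      have hne : p.1 ≠ k0 := fun he => h.1 (he ▸ hk0)
      have hne2 : ¬((((p.2, p.1) : Int × String)) == (v0, k0)) = true := by
        simp only [beq_iff_eq, Prod.mk.injEq, not_and]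
        intro _ h2
        exact hne h2
      rw [List.map_cons, List.erase_cons_tail hne2, List.filter_cons,
        if_pos (by simpa using hne), List.map_cons, ih h.2 hp]

-- the decrement fold: A's paired fold projects to M's fold, and the heap component
-- stays the swapped items of (current degree).erase node
theorem sl_fold_dec (node : String) (l : List String) (deg : PySem.Dict String Int)
    (hp : List (Int × String)) (h : deg.keys.Nodup)
    (hhp : hp = (deg.erase node).items.map (fun p => (p.2, p.1))) :
    (l.foldl
        (fun st nb =>
          if st.1.contains nb then
            let d' := st.1.insert nb (st.1.getD nb 0 - 1)
            (d', (d'.keys.filter (fun k => !(k == node))).map (fun k => (d'.getD k 0, k)))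
          else st)
        (deg, hp)).1
      = l.foldl (fun d nb => if d.contains nb then d.insert nb (d.getD nb 0 - 1) else d) deg
    ∧ (l.foldl
        (fun st nb =>
          if st.1.contains nb then
            let d' := st.1.insert nb (st.1.getD nb 0 - 1)
            (d', (d'.keys.filter (fun k => !(k == node))).map (fun k => (d'.getD k 0, k)))
          else st)
        (deg, hp)).2
      = (((l.foldl (fun d nb => if d.contains nb then d.insert nb (d.getD nb 0 - 1) else d) deg).erase node).items.map (fun p => (p.2, p.1)))
    ∧ (l.foldl (fun d nb => if d.contains nb then d.insert nb (d.getD nb 0 - 1) else d) deg).keys = deg.keys := by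
  induction l generalizing deg hp with
  | nil => exact ⟨rfl, by simpa using hhp, rfl⟩
  | cons nb l ih =>
    rw [List.foldl_cons, List.foldl_cons]
    by_cases hc : deg.contains nb
    · have hkeys : (deg.insert nb (deg.getD nb 0 - 1)).keys = deg.keys :=
        PySem.Dict.keys_insert_of_contains deg _ hc
      have hnd : (deg.insert nb (deg.getD nb 0 - 1)).keys.Nodup := by rw [hkeys]; exact h
      have hreb := sl_rebuild_eq_erase (deg.insert nb (deg.getD nb 0 - 1)) node hnd
      have := ih (deg.insert nb (deg.getD nb 0 - 1))
        ((((deg.insert nb (deg.getD nb 0 - 1)).keys.filter (fun k => !(k == node))).map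
          (fun k => ((deg.insert nb (deg.getD nb 0 - 1)).getD k 0, k)))) hnd hreb
      simp only [hc, if_true]
      refine ⟨this.1, this.2.1, by rw [this.2.2, hkeys]⟩
    · simp only [hc]
      exact ih deg hp h hhp

-- the A elimination loop equals the M loop under the heap invariant
theorem sl_loop_eq (g : PySem.Dict String (List String)) (fuel : Nat)
    (degree : PySem.Dict String Int) (acc : List String) (h : degree.keys.Nodup) :
    slLoopA g fuel (degree.items.map (fun p => (p.2, p.1))) degree acc
      = slLoopM g fuel degree acc := by
  induction fuel generalizing degree acc with
  | zero => rfl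
  | succ fuel ih =>
    rw [slLoopA, slLoopM]
    have hmin : PySem.List.min2? (degree.items.map (fun p => (p.2, p.1))) (fun p => p.1) (fun p => p.2)
        = Option.map (fun k => (degree.getD k 0, k))
            (PySem.List.min2? degree.keys (fun x => degree.getD x 0) (fun x => x)) := by
      rw [sl_items_swap_eq_keys_map degree h, sl_min2_map]
    rw [hmin]
    cases hB : PySem.List.min2? degree.keys (fun x => degree.getD x 0) (fun x => x) with
    | none => rfl
    | some node =>
      simp only [Option.map_some]
      have hnodemem : node ∈ degree.keys := sl_min2_mem _ _ _ hB
      obtain ⟨p, hpmem, hp1⟩ := List.mem_map.mp hnodemem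
      have hgetD : degree.getD node 0 = p.2 := by
        rw [← hp1]
        exact PySem.Dict.getD_of_mem_items degree (by exact hpmem) h 0
      have hitem : (node, degree.getD node 0) ∈ degree.items := by
        rw [hgetD, ← hp1]
        exact hpmem
      have herase : (degree.items.map (fun p => (p.2, p.1))).erase (degree.getD node 0, node)
          = (degree.erase node).items.map (fun p => (p.2, p.1)) := by
        have := sl_erase_pair degree.items node (degree.getD node 0) h hitem
        exact this
      have hfold := sl_fold_dec node (g.getD node []) degree
        ((degree.items.map (fun p => (p.2, p.1))).erase (degree.getD node 0, node)) h herase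
      rw [hfold.1, hfold.2.1]
      have hnd2 : ((g.getD node []).foldl (fun d nb => if d.contains nb then d.insert nb (d.getD nb 0 - 1) else d) degree).keys.Nodup := by
        rw [hfold.2.2]; exact h
      have hnd3 : (((g.getD node []).foldl (fun d nb => if d.contains nb then d.insert nb (d.getD nb 0 - 1) else d) degree).erase node).keys.Nodup := by
        show ((((g.getD node []).foldl (fun d nb => if d.contains nb then d.insert nb (d.getD nb 0 - 1) else d) degree).items.filter (fun p => !(p.1 == node))).map (fun x => x.1)).Nodup
        have hnd2b : (((g.getD node []).foldl (fun d nb => if d.contains nb then d.insert nb (d.getD nb 0 - 1) else d) degree).items.map (fun x : String × Int => x.1)).Nodup := hnd2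
        exact (List.Sublist.map (fun x : String × Int => x.1) (List.filter_sublist (l := ((g.getD node []).foldl (fun d nb => if d.contains nb then d.insert nb (d.getD nb 0 - 1) else d) degree).items))).nodup hnd2b
      exact ih _ (acc ++ [node]) hnd3

-- mex loop: with enough fuel it returns the least c' ≥ c outside the set
theorem sl_mex_spec (s : PySem.Set Int) :
    ∀ (fuel : Nat) (c : Int), (s.filter (fun x => decide (c ≤ x))).length < fuel →
      c ≤ slMexB s fuel c ∧ PySem.Set.contains s (slMexB s fuel c) = false ∧
        ∀ x, c ≤ x → x < slMexB s fuel c → PySem.Set.contains s x = true := by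
  intro fuel
  induction fuel with
  | zero => intro c hc; exact absurd hc (Nat.not_lt_zero _)
  | succ fuel ih =>
    intro c hfuel
    by_cases hc : PySem.Set.contains s c
    · have hcm : c ∈ s := by
        simpa [PySem.Set.contains, List.contains_iff_mem] using hc
      have hlt : (s.filter (fun x => decide (c + 1 ≤ x))).length
          < (s.filter (fun x => decide (c ≤ x))).length := by
        have hsub : s.filter (fun x => decide (c + 1 ≤ x))
            = (s.filter (fun x => decide (c ≤ x))).filter (fun x => decide (c + 1 ≤ x)) := by
          rw [List.filter_filter]
          apply List.filter_congr
          intro x _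
          by_cases hx : c + 1 ≤ x
          · have hx' : c ≤ x := by omega
            simp [hx, hx']
          · simp [hx]
        rw [hsub]
        have hcmem : c ∈ s.filter (fun x => decide (c ≤ x)) := by
          rw [List.mem_filter]
          exact ⟨hcm, by simp⟩
        apply Nat.lt_of_le_of_ne (List.length_filter_le _ _)
        intro heq
        have heqL := List.Sublist.eq_of_length List.filter_sublist heq
        rw [← heqL, List.mem_filter] at hcmem
        have h2 := hcmem.2
        simp only [decide_eq_true_eq] at h2
        omega
      have hrec := ih (c + 1) (by omega)
      have hstep : slMexB s (fuel + 1) c = slMexB s fuel (c + 1) := by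
        rw [slMexB, if_pos hc]
      rw [hstep]
      refine ⟨by omega, hrec.2.1, ?_⟩
      intro x hx1 hx2
      by_cases hxc : x = c
      · exact hxc ▸ hc
      · exact hrec.2.2 x (by omega) hx2
    · have hstep : slMexB s (fuel + 1) c = c := by
        rw [slMexB, if_neg hc]
      rw [hstep]
      exact ⟨le_refl c, by simpa using hc, fun x hx1 hx2 => absurd (lt_of_le_of_lt hx1 hx2) (lt_irrefl c)⟩

-- first free colour in range(a, n) = mex truncated at n
theorem sl_find_range (s : PySem.Set Int) (r : Int) :
    ∀ (k : Nat) (a n : Int), (n - a).toNat = k → a ≤ r →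
      (∀ x, a ≤ x → x < r → PySem.Set.contains s x = true) →
      PySem.Set.contains s r = false →
      slFindColorA s k a = if r < n then some r else none := by
  intro k
  induction k with
  | zero =>
    intro a n hk har hall hr
    rw [slFindColorA, if_neg (by omega)]
  | succ k ih =>
    intro a n hk har hall hr
    have han : a < n := by omega
    rw [slFindColorA]
    by_cases hca : PySem.Set.contains s a
    · have hane : a ≠ r := fun he => by rw [he, hr] at hca; exact Bool.false_ne_true hca
      have halt : a < r := lt_of_le_of_ne har hane
      rw [if_neg (by simpa using hca)]
      exact ih (a + 1) n (by omega) (by omega) (fun x hx1 hx2 => hall x (by omega) hx2) hr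
    · have har' : a = r := by
        by_contra hne
        have : a < r := lt_of_le_of_ne har hne
        exact hca (hall a (le_refl a) this)
      rw [if_pos (by simpa using hca), har', if_pos (by omega)]

-- A's colour loop equals the M colour loop
theorem sl_color_eq (g : PySem.Dict String (List String)) (n : Int) (l : List String)
    (color : PySem.Dict String Int) : slColorA g n l color = slColorM g n l color := by
  induction l generalizing color with
  | nil => rfl
  | cons node rest ih =>
    rw [slColorA, slColorM]
    set s := (g.getD node []).foldl
      (fun s nb => if color.contains nb then PySem.Set.add s (color.getD nb 0) else s)
      (PySem.Set.empty : PySem.Set Int) with hsdef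
    have hmex := sl_mex_spec s (s.length + 1) 0
      (Nat.lt_succ_of_le (List.length_filter_le _ _))
    have hfind := sl_find_range s (slMexB s (s.length + 1) 0) n.toNat 0 n (by omega)
      hmex.1 (fun x hx1 hx2 => hmex.2.2 x hx1 hx2) hmex.2.1
    rw [hfind]
    by_cases hrn : slMexB s (s.length + 1) 0 < n
    · rw [if_pos hrn, if_pos hrn]
      exact ih _
    · rw [if_neg hrn, if_neg hrn]
      exact ih _

-- ---- part 2: M = B (recomputed degrees equal the maintained degree dict) ----

-- the adjacency list read off the directed-pairs view
theorem sl_adj_getD (edges : List (String × String)) (x : String) :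
    (slGraphA edges).getD x []
      = ((slPairs edges).filter (fun p => p.1 == x)).map (fun p => p.2) := by
  unfold slGraphA
  rw [sl_graph_pairs]
  have := PySem.Dict.getD_foldl_modify_append (slPairs edges) (PySem.Dict.empty (κ := String) (ν := List String)) x
  simpa [PySem.Dict.getD_empty] using this

theorem sl_adj_keys (edges : List (String × String)) :
    (slGraphA edges).keys = PySem.Set.ofList ((slPairs edges).map (fun p => p.1)) := by
  unfold slGraphA
  rw [sl_graph_pairs]
  have := PySem.Dict.keys_foldl_modify_key (slPairs edges) (fun p => p.1) []
    (fun _ p => fun l => l ++ [p.2]) PySem.Dict.empty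
  rw [this, PySem.Dict.keys_empty]
  rfl

-- B's node list is exactly the graph's key list
theorem sl_nodes_eq (edges : List (String × String)) :
    slNodesB edges = PySem.Set.ofList ((slPairs edges).map (fun p => p.1)) := by
  have aux : ∀ (es : List (String × String)) (s : PySem.Set String),
      es.foldl (fun s e => PySem.Set.add (PySem.Set.add s e.1) e.2) s
        = ((es.flatMap (fun e => [(e.1, e.2), (e.2, e.1)])).map (fun p => p.1)).foldl PySem.Set.add s := by
    intro es
    induction es with
    | nil => intro s; rfl
    | cons e es ih => intro s; simp [List.flatMap_cons, ih]
  exact aux edges PySem.Set.empty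

-- every second component of a directed pair is also a first component
theorem sl_pairs_snd_mem (edges : List (String × String)) (p : String × String)
    (hp : p ∈ slPairs edges) : p.2 ∈ (slPairs edges).map (fun q => q.1) := by
  have hswap : (p.2, p.1) ∈ slPairs edges := by
    unfold slPairs at hp ⊢
    rw [List.mem_flatMap] at hp ⊢
    obtain ⟨e, he, hpe⟩ := hp
    refine ⟨e, he, ?_⟩
    rcases List.mem_cons.mp hpe with h1 | h1
    · subst h1; simp
    · simp only [List.mem_singleton] at h1
      subst h1; simp
  exact List.mem_map.mpr ⟨(p.2, p.1), hswap, rfl⟩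

-- a directed-pairs count is invariant under swapping the predicate's components
theorem sl_pairs_countP_swap (edges : List (String × String)) (q : String × String → Bool) :
    (slPairs edges).countP q = (slPairs edges).countP (fun p => q (p.2, p.1)) := by
  induction edges with
  | nil => rfl
  | cons e es ih =>
    show ((e.1, e.2) :: (e.2, e.1) :: slPairs es).countP q
      = ((e.1, e.2) :: (e.2, e.1) :: slPairs es).countP (fun p => q (p.2, p.1))
    rw [List.countP_cons, List.countP_cons, List.countP_cons, List.countP_cons, ih,
      show q ((e.1, e.2).2, (e.1, e.2).1) = q (e.2, e.1) from rfl,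
      show q ((e.2, e.1).2, (e.2, e.1).1) = q (e.1, e.2) from rfl]
    omega

-- a count split: pointwise 0/1 contributions add up
theorem sl_countP_split {α : Type} (l : List α) (q1 q2 q3 : α → Bool)
    (h : ∀ p ∈ l, (if q1 p then (1:Nat) else 0) = (if q2 p then 1 else 0) + (if q3 p then 1 else 0)) :
    l.countP q1 = l.countP q2 + l.countP q3 := by
  induction l with
  | nil => rfl
  | cons a l ih =>
    rw [List.countP_cons, List.countP_cons, List.countP_cons,
      ih (fun p hp => h p (List.mem_cons_of_mem a hp))]
    have := h a List.mem_cons_self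
    omega

-- the initial degree dict agrees with the mathematical degree on the full node list
theorem sl_deg_init (edges : List (String × String)) (x : String)
    (hx : x ∈ (slGraphA edges).keys) :
    (slDegreeA (slGraphA edges)).getD x 0 = slDeg edges (slNodesB edges) x := by
  obtain ⟨p, hpmem, hp1⟩ := List.mem_map.mp hx
  have hnd := sl_graph_nodup edges
  have hadj : (slGraphA edges).getD x [] = p.2 := by
    rw [← hp1]; exact PySem.Dict.getD_of_mem_items _ (by exact hpmem) hnd []
  have hdi : (slDegreeA (slGraphA edges)).items
      = (slGraphA edges).items.map (fun p => (p.1, (p.2.length : Int))) := by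
    have := sl_degree_items (slGraphA edges).items PySem.Dict.empty (by
      rw [PySem.Dict.keys_empty]; simpa using hnd)
    simpa [slDegreeA] using this
  have hdnd : (slDegreeA (slGraphA edges)).keys.Nodup := by
    show ((slDegreeA (slGraphA edges)).items.map (fun x => x.1)).Nodup
    rw [hdi, List.map_map]
    exact hnd
  have hmem2 : (x, (p.2.length : Int)) ∈ (slDegreeA (slGraphA edges)).items := by
    rw [hdi]
    exact List.mem_map.mpr ⟨p, hpmem, by rw [hp1]⟩
  rw [PySem.Dict.getD_of_mem_items _ hmem2 hdnd 0]
  have hlen : p.2.length = ((slPairs edges).filter (fun q => q.1 == x)).length := by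
    have := sl_adj_getD edges x
    rw [hadj] at this
    rw [this, List.length_map]
  rw [hlen,
    show (List.filter (fun q => q.1 == x) (slPairs edges)).length
      = (slPairs edges).countP (fun q => q.1 == x) from List.countP_eq_length_filter.symm]
  unfold slDeg
  congr 1
  apply List.countP_congr
  intro q hq
  have hmem : q.2 ∈ slNodesB edges := by
    rw [sl_nodes_eq]
    exact (PySem.Set.mem_ofList _ _).mpr (sl_pairs_snd_mem edges q hq)
  have h2 : (slNodesB edges).contains q.2 = true := by simpa using hmem
  simp [hmem]

-- B's per-round degree dict agrees with the mathematical degree on rem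
theorem sl_degdict_getD (edges : List (String × String)) (rem : List String) (x : String)
    (hx : rem.contains x = true) :
    (slDegDictB edges rem).getD x 0 = slDeg edges rem x := by
  have hxmem : x ∈ rem := by simpa using hx
  -- the zero-initialised dict: every getD is 0 and contains mirrors rem
  have hinit0 : ∀ (l : List String) (d : PySem.Dict String Int),
      (∀ y, d.getD y 0 = 0) → ∀ y, (l.foldl (fun d x => d.insert x 0) d).getD y 0 = 0 := by
    intro l
    induction l with
    | nil => intro d hd y; exact hd y
    | cons a l ih =>
      intro d hd y
      refine ih _ (fun z => ?_) y
      rw [PySem.Dict.getD_insert]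
      split_ifs with h
      · rfl
      · exact hd z
  have hinitc : ∀ y, ((rem.foldl (fun d x => d.insert x (0:Int)) PySem.Dict.empty)).contains y
      = rem.contains y := by
    intro y
    rw [PySem.Dict.contains_eq_decide_mem_keys]
    rw [PySem.Dict.keys_foldl_insert rem (fun _ _ => (0:Int)) PySem.Dict.empty,
      PySem.Dict.keys_empty]
    by_cases hy : y ∈ rem
    · simp [hy, (PySem.Set.mem_ofList rem y).mpr hy,
        show (PySem.Set.update ([] : List String) rem) = PySem.Set.ofList rem from rfl]
    · have : y ∉ PySem.Set.ofList rem := fun hc => hy ((PySem.Set.mem_ofList rem y).mp hc)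
      simp [hy, this,
        show (PySem.Set.update ([] : List String) rem) = PySem.Set.ofList rem from rfl]
  -- the edge scan adds exactly the directed-pair count
  have aux : ∀ (es : List (String × String)) (d : PySem.Dict String Int),
      (∀ y, d.contains y = rem.contains y) →
      (es.foldl
        (fun d e =>
          if d.contains e.1 && d.contains e.2 then
            (d.modify e.1 0 (· + 1)).modify e.2 0 (· + 1)
          else d) d).getD x 0
        = d.getD x 0 + ((es.flatMap (fun e => [(e.1, e.2), (e.2, e.1)])).countP
            (fun p => p.1 == x && rem.contains p.2) : Int) := by
    intro es
    induction es with
    | nil => intro d _; simp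
    | cons e es ih =>
      intro d hd
      rw [List.foldl_cons]
      by_cases hb : e.1 ∈ rem ∧ e.2 ∈ rem
      · have hb1 : rem.contains e.1 = true := by simpa using hb.1
        have hb2 : rem.contains e.2 = true := by simpa using hb.2
        have hc : (d.contains e.1 && d.contains e.2) = true := by
          rw [hd e.1, hd e.2, hb1, hb2]; rfl
        rw [if_pos hc]
        have hd' : ∀ y, ((d.modify e.1 0 (· + 1)).modify e.2 0 (· + 1)).contains y
            = rem.contains y := by
          intro y
          rw [PySem.Dict.contains_modify, PySem.Dict.contains_modify, hd y]
          by_cases hy2 : y = e.2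
          · subst hy2; rw [hb2]; simp
          · by_cases hy1 : y = e.1
            · subst hy1; rw [hb1]; simp
            · rw [show (y == e.2) = false from by simp [hy2],
                show (y == e.1) = false from by simp [hy1]]
              simp
        rw [ih _ hd']
        have hg : ((d.modify e.1 0 (· + 1)).modify e.2 0 (· + 1)).getD x 0
            = d.getD x 0 + (if e.1 = x then 1 else 0) + (if e.2 = x then 1 else 0) := by
          by_cases hx2 : x = e.2
          · subst hx2
            by_cases hx1 : e.2 = e.1
            · rw [PySem.Dict.getD_modify, if_pos rfl, PySem.Dict.getD_modify, if_pos hx1,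
                if_pos hx1.symm, if_pos rfl, hx1]
            · rw [PySem.Dict.getD_modify, if_pos rfl, PySem.Dict.getD_modify, if_neg hx1,
                if_neg (fun h => hx1 h.symm), if_pos rfl]
              ring
          · by_cases hx1 : x = e.1
            · subst hx1
              rw [PySem.Dict.getD_modify, if_neg hx2, PySem.Dict.getD_modify, if_pos rfl,
                if_pos rfl, if_neg (fun h => hx2 h.symm)]
              ring
            · rw [PySem.Dict.getD_modify, if_neg hx2, PySem.Dict.getD_modify, if_neg hx1,
                if_neg (fun h => hx1 h.symm), if_neg (fun h => hx2 h.symm)]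
              ring
        rw [hg]
        rw [List.flatMap_cons, List.countP_append]
        have hhead : ([(e.1, e.2), (e.2, e.1)].countP (fun p => p.1 == x && rem.contains p.2))
            = (if e.1 = x then 1 else 0) + (if e.2 = x then 1 else 0) := by
          simp only [List.countP_cons, List.countP_nil, hb1, hb2, Bool.and_true]
          by_cases h1 : e.1 = x <;> by_cases h2 : e.2 = x <;> simp [h1, h2]
        rw [hhead]
        push_cast
        ring
      · have hc : (d.contains e.1 && d.contains e.2) = false := by
          rw [hd e.1, hd e.2]
          by_cases h1 : e.1 ∈ rem
          · have h2 : e.2 ∉ rem := fun hm => hb ⟨h1, hm⟩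
            simp [h2]
          · simp [h1]
        rw [if_neg (by simp [hc])]
        rw [ih _ hd]
        have hhead : ([(e.1, e.2), (e.2, e.1)].countP (fun p => p.1 == x && rem.contains p.2)) = 0 := by
          have hp1 : ((e.1 == x) && rem.contains e.2) = false := by
            by_cases h1 : e.1 = x
            · have h2 : e.2 ∉ rem := fun hm => hb ⟨h1 ▸ hxmem, hm⟩
              simp [h2]
            · simp [h1]
          have hp2 : ((e.2 == x) && rem.contains e.1) = false := by
            by_cases h2 : e.2 = x
            · have h1 : e.1 ∉ rem := fun hm => hb ⟨hm, h2 ▸ hxmem⟩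
              simp [h1]
            · simp [h2]
          simp only [List.countP_cons, List.countP_nil, hp1, hp2]
          rfl
        rw [List.flatMap_cons, List.countP_append, hhead]
        simp
  unfold slDegDictB slDeg slPairs
  rw [aux edges _ hinitc, hinit0 rem PySem.Dict.empty (fun y => PySem.Dict.getD_empty y 0) x]
  simp

-- the decrement fold on the M side: keys/contains stay, values drop by the count
theorem sl_dec_getD (l : List String) :
    ∀ (d : PySem.Dict String Int),
      (∀ y, (l.foldl (fun d nb => if d.contains nb then d.insert nb (d.getD nb 0 - 1) else d) d).contains y = d.contains y)
      ∧ (∀ x, d.contains x = true →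
          (l.foldl (fun d nb => if d.contains nb then d.insert nb (d.getD nb 0 - 1) else d) d).getD x 0
            = d.getD x 0 - (l.count x : Int)) := by
  induction l with
  | nil => intro d; exact ⟨fun _ => rfl, fun x _ => by simp⟩
  | cons nb l ih =>
    intro d
    rw [List.foldl_cons]
    by_cases hc : d.contains nb
    · rw [if_pos hc]
      have hcont : ∀ y, (d.insert nb (d.getD nb 0 - 1)).contains y = d.contains y := by
        intro y
        rw [PySem.Dict.contains_insert]
        by_cases hy : y = nb
        · subst hy; simp [hc]
        · simp [hy]
      constructor
      · intro y; rw [(ih _).1 y, hcont y]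
      · intro x hx
        rw [(ih _).2 x (by rw [hcont x]; exact hx)]
        rw [PySem.Dict.getD_insert]
        have hcnt : ((nb :: l).count x : Int) = (l.count x : Int) + (if x = nb then 1 else 0) := by
          rw [List.count_cons]
          by_cases hxnb : x = nb
          · simp [hxnb]
          · simp [hxnb, show ¬nb = x from fun h => hxnb h.symm]
        by_cases hxnb : x = nb
        · subst hxnb; rw [if_pos rfl, hcnt, if_pos rfl]; ring
        · rw [if_neg hxnb, hcnt, if_neg hxnb]; ring
    · rw [if_neg hc]
      constructor
      · exact (ih _).1
      · intro x hx
        rw [(ih _).2 x hx]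
        have hcf : d.contains nb = false := by simpa using hc
        have hxnb : x ≠ nb := fun h => by rw [h, hcf] at hx; exact Bool.false_ne_true hx
        rw [List.count_cons, if_neg (by simpa using fun h => hxnb h.symm)]
        simp

-- erase: keys are filtered, other lookups unchanged
theorem sl_erase_keys {ν : Type} (d : PySem.Dict String ν) (k : String) :
    (d.erase k).keys = d.keys.filter (fun y => !(y == k)) := by
  show (d.items.filter (fun p => !(p.1 == k))).map (fun p => p.1)
      = (d.items.map (fun p => p.1)).filter (fun y => !(y == k))
  rw [List.filter_map]
  rfl

theorem sl_erase_getD (d : PySem.Dict String Int) (k x : String) (hx : x ≠ k) :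
    (d.erase k).getD x 0 = d.getD x 0 := by
  have aux : ∀ (l : List (String × Int)),
      (PySem.Dict.mk (l.filter (fun p => !(p.1 == k)))).get? x = (PySem.Dict.mk l).get? x := by
    intro l
    induction l with
    | nil => rfl
    | cons p l ih =>
      rw [List.filter_cons]
      by_cases hp : p.1 = k
      · rw [if_neg (by simp [hp]), ih, PySem.Dict.get?_mk_cons,
          if_neg (by simp [hp]; exact fun h => hx (h ▸ hp ▸ rfl))]
      · rw [if_pos (by simp [hp]), show ((p.1, p.2) :: l.filter (fun p => !(p.1 == k))) = p :: l.filter (fun p => !(p.1 == k)) from by rw [Prod.mk.eta]]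
        rw [PySem.Dict.get?_mk_cons, PySem.Dict.get?_mk_cons, ih]
  rw [PySem.Dict.getD_eq_get?_getD, PySem.Dict.getD_eq_get?_getD]
  have : (d.erase k).get? x = d.get? x := by
    show (PySem.Dict.mk (d.items.filter (fun p => !(p.1 == k)))).get? x = d.get? x
    rw [aux d.items]
  rw [this]

-- min2? only depends on the key values on the list
theorem sl_min2_congr {α : Type} (xs : List α) (k1 k1' : α → Int) (k2 : α → String)
    (h : ∀ x ∈ xs, k1 x = k1' x) :
    PySem.List.min2? xs k1 k2 = PySem.List.min2? xs k1' k2 := by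
  unfold PySem.List.min2?
  have aux : ∀ (ys : List α) (acc : Option α),
      (∀ x ∈ ys, k1 x = k1' x) → (∀ m, acc = some m → k1 m = k1' m) →
      List.foldl
        (fun acc x =>
          match acc with
          | none => some x
          | some m => if (decide (k1 x < k1 m) || (!decide (k1 m < k1 x) && decide (k2 x < k2 m))) then some x else some m)
        acc ys
      = List.foldl
        (fun acc x =>
          match acc with
          | none => some x
          | some m => if (decide (k1' x < k1' m) || (!decide (k1' m < k1' x) && decide (k2 x < k2 m))) then some x else some m)
        acc ys := by
    intro ys
    induction ys with
    | nil => intro acc _ _; rfl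
    | cons y ys ih =>
      intro acc hy hacc
      have htail := fun acc' => ih acc' (fun x hx => hy x (List.mem_cons_of_mem _ hx))
      cases acc with
      | none =>
        rw [List.foldl_cons, List.foldl_cons]
        exact htail (some y)
          (fun m hm => by rw [Option.some.injEq] at hm; exact hm ▸ hy y List.mem_cons_self)
      | some m =>
        have h1 : k1 y = k1' y := hy y List.mem_cons_self
        have h2 : k1 m = k1' m := hacc m rfl
        simp only [List.foldl_cons]
        rw [show (if (decide (k1 y < k1 m) || (!decide (k1 m < k1 y) && decide (k2 y < k2 m))) then some y else some m)
            = (if (decide (k1' y < k1' m) || (!decide (k1' m < k1' y) && decide (k2 y < k2 m))) then some y else some m) from by rw [h1, h2]]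
        split_ifs with hcond
        · exact htail (some y) (fun m' hm' => by rw [Option.some.injEq] at hm'; exact hm' ▸ h1)
        · exact htail (some m) (fun m' hm' => by rw [Option.some.injEq] at hm'; exact hm' ▸ h2)
  exact aux xs none h (fun m hm => by cases hm)

-- one elimination step: the mathematical degrees of the survivors drop by the
-- adjacency count of the removed node
theorem sl_deg_step (edges : List (String × String)) (rem : List String) (node x : String)
    (hnode : node ∈ rem) :
    slDeg edges (rem.filter (fun y => !(y == node))) x
      = slDeg edges rem x - (((slGraphA edges).getD node []).count x : Int) := by
  have hcount : ((slGraphA edges).getD node []).count x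
      = (slPairs edges).countP (fun p => p.1 == x && p.2 == node) := by
    rw [sl_adj_getD, List.count_eq_countP, List.countP_map, List.countP_filter]
    rw [sl_pairs_countP_swap edges (fun p => ((fun y => y == x) ∘ (fun p : String × String => p.2)) p && (p.1 == node))]
    rfl
  have hsplit : (slPairs edges).countP (fun p => p.1 == x && rem.contains p.2)
      = (slPairs edges).countP (fun p => p.1 == x && (rem.filter (fun y => !(y == node))).contains p.2)
        + (slPairs edges).countP (fun p => p.1 == x && p.2 == node) := by
    apply sl_countP_split
    intro p _
    by_cases hp1 : p.1 = x
    · by_cases hp2 : p.2 = node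
      · simp [hp1, hp2, hnode]
      · have hiff : p.2 ∈ rem.filter (fun y => !(y == node)) ↔ p.2 ∈ rem := by
          rw [List.mem_filter]
          simp [hp2]
        simp [hp1, hp2, hiff]
    · simp [hp1]
  unfold slDeg
  rw [hcount, hsplit]
  push_cast
  ring

-- the decrement fold never changes the key list
theorem sl_dec_keys (l : List String) :
    ∀ (d : PySem.Dict String Int),
      (l.foldl (fun d nb => if d.contains nb then d.insert nb (d.getD nb 0 - 1) else d) d).keys = d.keys := by
  induction l with
  | nil => intro d; rfl
  | cons nb l ih =>
    intro d
    rw [List.foldl_cons]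
    by_cases hc : d.contains nb
    · rw [if_pos hc, ih, PySem.Dict.keys_insert_of_contains d _ hc]
    · rw [if_neg hc, ih]

-- the two elimination loops agree under the degree invariant
theorem sl_loopMB (edges : List (String × String)) (fuel : Nat) :
    ∀ (degree : PySem.Dict String Int) (rem : List String) (acc : List String),
      degree.keys = rem → rem.Nodup →
      (∀ x ∈ rem, degree.getD x 0 = slDeg edges rem x) →
      slLoopM (slGraphA edges) fuel degree acc = slLoopB edges fuel rem acc := by
  induction fuel with
  | zero => intro degree rem acc _ _ _; rfl
  | succ fuel ih =>
    intro degree rem acc hkeys hnd hdeg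
    rw [slLoopM, slLoopB]
    have hminL : PySem.List.min2? degree.keys (fun x => degree.getD x 0) (fun x => x)
        = PySem.List.min2? rem (fun x => slDeg edges rem x) (fun x => x) := by
      rw [hkeys]
      exact sl_min2_congr rem _ _ _ hdeg
    have hminR : PySem.List.min2? rem (fun x => (slDegDictB edges rem).getD x 0) (fun x => x)
        = PySem.List.min2? rem (fun x => slDeg edges rem x) (fun x => x) := by
      exact sl_min2_congr rem _ _ _
        (fun x hxm => sl_degdict_getD edges rem x (by rw [List.contains_iff_mem]; exact hxm))
    rw [hminL, hminR]
    cases hm : PySem.List.min2? rem (fun x => slDeg edges rem x) (fun x => x) with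
    | none => rfl
    | some node =>
      have hnodem : node ∈ rem := sl_min2_mem _ _ _ hm
      have hdecl := sl_dec_getD ((slGraphA edges).getD node [])
      set deg2 := ((slGraphA edges).getD node []).foldl
        (fun d nb => if d.contains nb then d.insert nb (d.getD nb 0 - 1) else d) degree with hdeg2
      have hkeys2 : deg2.keys = degree.keys := sl_dec_keys _ degree
      apply ih (deg2.erase node) (rem.filter (fun y => !(y == node))) (acc ++ [node])
      · rw [sl_erase_keys, hkeys2, hkeys]
      · exact hnd.filter _
      · intro x hxm
        rw [List.mem_filter] at hxm
        have hxr : x ∈ rem := hxm.1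
        have hxn : x ≠ node := by simpa using hxm.2
        rw [sl_erase_getD _ _ _ hxn]
        have hcx : degree.contains x = true := by
          rw [PySem.Dict.contains_eq_decide_mem_keys, hkeys]
          simpa using hxr
        rw [(hdecl degree).2 x hcx, hdeg x hxr, sl_deg_step edges rem node x hnodem]

-- B's used-colour scan over the edges equals the M scan over the adjacency list
theorem sl_used_eq (edges : List (String × String)) (color : PySem.Dict String Int)
    (node : String) :
    slUsedB edges color node
      = ((slGraphA edges).getD node []).foldl
          (fun s nb => if color.contains nb then PySem.Set.add s (color.getD nb 0) else s)
          PySem.Set.empty := by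
  have aux : ∀ (es : List (String × String)) (s : PySem.Set Int),
      es.foldl
        (fun s e =>
          let s' := if e.1 == node && color.contains e.2 then PySem.Set.add s (color.getD e.2 0) else s
          if e.2 == node && color.contains e.1 then PySem.Set.add s' (color.getD e.1 0) else s')
        s
      = (((es.flatMap (fun e => [(e.1, e.2), (e.2, e.1)])).filter (fun p => p.1 == node)).map (fun p => p.2)).foldl
          (fun s nb => if color.contains nb then PySem.Set.add s (color.getD nb 0) else s) s := by
    intro es
    induction es with
    | nil => intro s; rfl
    | cons e es ihe =>
      intro s
      rw [List.foldl_cons, List.flatMap_cons, List.filter_append, List.map_append,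
        List.foldl_append, ihe]
      congr 1
      by_cases h1 : e.1 = node <;> by_cases h2 : e.2 = node <;>
        simp only [List.filter_cons, List.filter_nil, h1, h2, beq_self_eq_true, if_true,
          beq_iff_eq, if_false, List.map_cons, List.map_nil, List.foldl_cons, List.foldl_nil] <;>
        simp [h1, h2]
  unfold slUsedB
  rw [aux edges PySem.Set.empty, sl_adj_getD]
  rfl

-- the two colouring loops agree
theorem sl_colorMB (edges : List (String × String)) (n : Int) (l : List String) :
    ∀ (color : PySem.Dict String Int),
      slColorM (slGraphA edges) n l color = slColorB edges n l color := by
  induction l with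
  | nil => intro color; rfl
  | cons node rest ih =>
    intro color
    rw [slColorM, slColorB, sl_used_eq edges color node]
    exact ih _

-- ===== VERDICT (by name: the statement is the Claim_ definition above) =====
theorem sl_coloring_spec : Claim_equal_sl_coloring := by
  intro edges n _
  unfold Spec_sl_coloring
  show (slColorA (slGraphA edges) n
      (slLoopA (slGraphA edges) ((slGraphA edges).items.map (fun p => ((p.2.length : Int), p.1))).length
        ((slGraphA edges).items.map (fun p => ((p.2.length : Int), p.1))) (slDegreeA (slGraphA edges)) []).reverse
      PySem.Dict.empty).items
    = (slColorB edges n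
      (slLoopB edges (slNodesB edges).length (slNodesB edges) []).reverse
      PySem.Dict.empty).items
  set g := slGraphA edges with hg
  have hgnd : g.keys.Nodup := sl_graph_nodup edges
  have hdeg : (slDegreeA g).items = g.items.map (fun p => (p.1, (p.2.length : Int))) := by
    have := sl_degree_items g.items PySem.Dict.empty (by
      simpa [PySem.Dict.keys_empty] using hgnd)
    simpa [slDegreeA, PySem.Dict.empty] using this
  have hkeys : (slDegreeA g).keys = g.keys := by
    show (slDegreeA g).items.map (fun x => x.1) = g.items.map (fun x => x.1)
    rw [hdeg, List.map_map]
    rfl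
  have hnd : (slDegreeA g).keys.Nodup := by rw [hkeys]; exact hgnd
  have hheap : g.items.map (fun p => ((p.2.length : Int), p.1))
      = (slDegreeA g).items.map (fun p => (p.2, p.1)) := by
    rw [hdeg, List.map_map]
    rfl
  have hnodes : slNodesB edges = g.keys := by
    rw [sl_nodes_eq, hg, sl_adj_keys]
  have hloop : slLoopA g ((g.items.map (fun p => ((p.2.length : Int), p.1))).length)
      (g.items.map (fun p => ((p.2.length : Int), p.1))) (slDegreeA g) []
      = slLoopB edges (slNodesB edges).length (slNodesB edges) [] := by
    rw [hheap, sl_loop_eq g _ _ [] hnd]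
    have hlen2 : ((slDegreeA g).items.map (fun p => (p.2, p.1))).length = (slNodesB edges).length := by
      rw [List.length_map, hnodes]
      show (slDegreeA g).items.length = (g.items.map (fun p => p.1)).length
      rw [hdeg, List.length_map, List.length_map]
    rw [hlen2, hg]
    apply sl_loopMB
    · rw [← hg, hkeys, hnodes]
    · rw [hnodes]; exact hgnd
    · intro x hxm
      exact sl_deg_init edges x (by rw [← hg, ← hnodes]; exact hxm)
  rw [hloop, sl_color_eq, sl_colorMB]
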